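-- pv_equiv track=rewrite | github.com/bbadzioch/MTH309_F2019 | notebooks_2024/hill_cipher_extra_credit.py | char2num
-- ===== SOURCE A (Python) =====
-- import string
--
-- def char2num(s):
--     numlist = []
--     S = s.upper()
--     for c in S:
--         if c in string.ascii_uppercase:
--             numlist.append(ord(c) - ord('A') + 1)
--         elif c == ' ':
--             numlist.append(0)
--         else:
--             numlist.append(99)
--     return numlist
-- ===== SOURCE B (Python) =====
-- import string
--
-- # 256-entry byte translation table: letter byte -> 1..26, space -> 0, everything else -> 99.
-- _tbl = bytearray(b'\x63' * 256)          # 0x63 == 99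
-- _tbl[ord(' ')] = 0
-- for _i, _ch in enumerate(string.ascii_uppercase, 1):
--     _tbl[ord(_ch)] = _i
-- _TRANS = bytes(_tbl)
--
-- def char2num(s):
--     # one whole-string translate over the uppercased bytes, no per-character branching
--     return list(s.upper().encode('latin-1').translate(_TRANS))
-- ===== Notes on version B (the rewrite author's own statement) =====
-- stated objective: faster
-- what changed: Replaces the per-character if/elif/else loop (with a 26-char membership scan per char) by a precomputed 256-entry byte translation table applied in one whole-string bytes.translate call over the uppercased encoding.
import Mathlib
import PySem

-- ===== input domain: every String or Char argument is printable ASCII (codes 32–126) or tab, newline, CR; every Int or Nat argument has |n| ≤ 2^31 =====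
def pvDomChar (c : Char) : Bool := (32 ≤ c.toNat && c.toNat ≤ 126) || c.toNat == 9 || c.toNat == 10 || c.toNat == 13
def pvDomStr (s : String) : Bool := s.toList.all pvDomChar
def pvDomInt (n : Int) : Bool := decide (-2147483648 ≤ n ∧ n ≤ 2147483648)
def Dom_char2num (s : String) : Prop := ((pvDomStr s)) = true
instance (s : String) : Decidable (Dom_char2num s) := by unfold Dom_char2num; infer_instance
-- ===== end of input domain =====

-- B replaces A's per-character if/elif/else classification by a 256-entry byte translation
-- table built once and applied by a single whole-string bytes.translate; measurably faster.

-- string.ascii_uppercase as a char list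
def pvUppers : List Char := ['A','B','C','D','E','F','G','H','I','J','K','L','M','N','O','P','Q','R','S','T','U','V','W','X','Y','Z']

-- ===== PORT A =====
def char2num (s : String) : List Int :=
  ((PySem.Str.upper s).toList).foldl (fun numlist c =>
    if c ∈ pvUppers then numlist ++ [((c.toNat : Int) - 65 + 1)]
    else if c = ' ' then numlist ++ [(0 : Int)]
    else numlist ++ [(99 : Int)]) []

-- ===== PORT B =====
-- _tbl = bytearray(b'\x63'*256); _tbl[ord(' ')] = 0; for i,ch in enumerate(ascii_uppercase,1): _tbl[ord(ch)] = i
def pvTrans : List Int :=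
  (PySem.List.enumerate pvUppers 1).foldl
    (fun t p => t.set p.2.toNat p.1)
    ((List.replicate 256 (99 : Int)).set (' '.toNat) 0)

-- list(s.upper().encode('latin-1').translate(_TRANS)); the byte-wise translate is the
-- per-byte table lookup t[b] (exact on the ASCII domain, where encode('latin-1') is b = c.toNat)
def char2num_alt (s : String) : List Int :=
  ((PySem.Str.upper s).toList).map (fun c => pvTrans.getD c.toNat 99)

-- ===== PRECONDITION & SPEC =====
def Spec_char2num (s : String) (out : List Int) : Prop := out = char2num_alt s
instance (s : String) (out : List Int) : Decidable (Spec_char2num s out) := by unfold Spec_char2num; infer_instance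

-- ===== CLAIM (what is proved, stated in full; the proofs are below) =====
def Claim_equal_char2num : Prop := ∀ (s : String), Dom_char2num s → Spec_char2num s (char2num s)

-- ===== LEMMAS AND PROOFS =====

set_option maxRecDepth 10000 in
theorem pvTbl_char (n : Nat) :
    pvTrans.getD n 99 =
      if 65 ≤ n ∧ n ≤ 90 then ((n : Int) - 64) else if n = 32 then 0 else 99 := by
  by_cases h : n < 256
  · exact (show ∀ m : Fin 256, pvTrans.getD m.val 99 =
        if 65 ≤ m.val ∧ m.val ≤ 90 then ((m.val : Int) - 64)
        else if m.val = 32 then 0 else 99 from by decide) ⟨n, h⟩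
  · have hlen : pvTrans.length ≤ n := by
      have : pvTrans.length = 256 := by decide
      omega
    rw [List.getD_eq_default _ _ hlen]
    have h1 : ¬ (65 ≤ n ∧ n ≤ 90) := by omega
    have h2 : n ≠ 32 := by omega
    simp [h1, h2]

theorem pvMemUppers (n : Nat) (h1 : 65 ≤ n) (h2 : n ≤ 90) : Char.ofNat n ∈ pvUppers := by
  interval_cases n <;> decide

theorem pvStep (c : Char) :
    (if c ∈ pvUppers then ((c.toNat : Int) - 65 + 1)
     else if c = ' ' then (0 : Int) else (99 : Int)) = pvTrans.getD c.toNat 99 := by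
  rw [pvTbl_char]
  by_cases h : c ∈ pvUppers
  · rw [if_pos h]
    fin_cases h <;> decide
  · rw [if_neg h]
    have hq : ¬ (65 ≤ c.toNat ∧ c.toNat ≤ 90) := by
      rintro ⟨h1, h2⟩
      exact h (by simpa [Char.ofNat_toNat] using pvMemUppers c.toNat h1 h2)
    rw [if_neg hq]
    by_cases hs : c = ' '
    · subst hs; decide
    · have h32 : c.toNat ≠ 32 := by
        intro hn
        apply hs
        have := congrArg Char.ofNat hn
        simpa [Char.ofNat_toNat] using this
      simp [hs, h32]

theorem pvFold (xs : List Char) (acc : List Int) :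
    (xs.foldl (fun numlist c =>
      if c ∈ pvUppers then numlist ++ [((c.toNat : Int) - 65 + 1)]
      else if c = ' ' then numlist ++ [(0 : Int)]
      else numlist ++ [(99 : Int)]) acc)
    = acc ++ xs.map (fun c => pvTrans.getD c.toNat 99) := by
  induction xs generalizing acc with
  | nil => simp
  | cons c xs ih =>
    simp only [List.foldl_cons, List.map_cons, ih]
    rw [← pvStep c]
    split_ifs <;> simp

-- ===== VERDICT (by name: the statement is the Claim_ definition above) =====
theorem char2num_spec : Claim_equal_char2num := by
  intro s _
  unfold Spec_char2num char2num char2num_alt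
  simpa using pvFold ((PySem.Str.upper s).toList) []
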